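-- pv_equiv track=rewrite | github.com/barahona-research-group/ICE-NODE | icenode/ehr_model/coding_scheme.py | _bfs_traversal
-- ===== SOURCE A (Python) =====
-- from collections import defaultdict, OrderedDict
--
-- def _bfs_traversal(connection, code, include_itself):
--     result = OrderedDict()
--     q = [code]
--
--     while len(q) != 0:
--         # remove the first element from the stack
--         current_code = q.pop(0)
--         current_connections = connection.get(current_code, [])
--         q.extend([c for c in current_connections if c not in result])
--         if current_code not in result:
--             result[current_code] = 1
--
--     if not include_itself:
--         del result[code]
--     return list(result.keys())
-- ===== SOURCE B (Python) =====
-- def _bfs_traversal(connection, code, include_itself):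
--     visited = set()
--     order = []
--     frontier = [code]
--     while frontier:
--         next_frontier = []
--         for node in frontier:
--             if node not in visited:
--                 visited.add(node)
--                 order.append(node)
--                 next_frontier.extend(connection.get(node, []))
--         frontier = next_frontier
--     return order if include_itself else order[1:]
-- ===== Notes on version B (the rewrite author's own statement) =====
-- stated objective: alternative
-- what changed: Replaces A's single FIFO queue (list.pop(0) with enqueue-time filtering against the visited dict, re-scanning neighbours of already-visited duplicates) by a level-synchronous BFS: a visited set plus an order list, scanning each frontier left to right and building the next frontier, which visits the same codes in the identical order without any pop(0).
import Mathlib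
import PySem

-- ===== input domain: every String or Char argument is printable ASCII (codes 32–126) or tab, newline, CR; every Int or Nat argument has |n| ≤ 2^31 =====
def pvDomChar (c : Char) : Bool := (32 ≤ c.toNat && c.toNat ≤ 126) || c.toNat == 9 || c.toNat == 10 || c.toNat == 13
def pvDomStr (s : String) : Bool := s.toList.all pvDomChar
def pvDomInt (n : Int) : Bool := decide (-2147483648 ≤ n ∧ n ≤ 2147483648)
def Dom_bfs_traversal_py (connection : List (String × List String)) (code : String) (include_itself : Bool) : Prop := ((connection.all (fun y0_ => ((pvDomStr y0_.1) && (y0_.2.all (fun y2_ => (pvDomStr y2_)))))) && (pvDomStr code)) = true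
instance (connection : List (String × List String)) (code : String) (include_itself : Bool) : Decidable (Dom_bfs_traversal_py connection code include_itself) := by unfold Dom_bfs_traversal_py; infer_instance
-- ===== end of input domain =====

-- B re-implements the same BFS as a level-synchronous frontier sweep (visited set + per-level
-- nested loops) instead of A's single FIFO queue with pop(0); same return value, no mutation.

-- ===== PORT A =====
-- connection.get(x, [])
def adjOf (conn : List (String × List String)) (x : String) : List String :=
  (PySem.Dict.mk conn).getD x []

-- all strings occurring in adjacency lists (termination measure only)
def adjU (conn : List (String × List String)) : Finset String :=
  (conn.flatMap (fun p => p.2)).toFinset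

-- termination measure: codes possibly still to visit, position of first unvisited queue entry
def measureA (conn : List (String × List String)) (result : PySem.Dict String Int)
    (q : List String) : Nat :=
  ((q.toFinset ∪ adjU conn) \ result.keys.toFinset).card

def posA (result : PySem.Dict String Int) (q : List String) : Nat :=
  q.findIdx (fun c => !(result.contains c))

lemma mem_adjOf {conn : List (String × List String)} {x y : String}
    (h : y ∈ adjOf conn x) : y ∈ adjU conn := by
  simp only [adjOf, PySem.Dict.getD, PySem.Dict.get?] at h
  rcases hf : List.find? (fun p => p.1 == x) (PySem.Dict.mk conn).items with _ | p
  · rw [hf] at h; simp at h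
  · rw [hf] at h
    simp only [Option.map_some, Option.getD_some] at h
    have hp := List.mem_of_find?_eq_some hf
    simp only [adjU, List.mem_toFinset, List.mem_flatMap]
    exact ⟨p, hp, h⟩

lemma termA (conn : List (String × List String)) (result : PySem.Dict String Int)
    (current : String) (rest : List String) :
    Prod.Lex (· < ·) (· < ·)
      (measureA conn (if result.contains current then result else result.insert current 1)
        (rest ++ (adjOf conn current).filter (fun c => !(result.contains c))),
       posA (if result.contains current then result else result.insert current 1)
        (rest ++ (adjOf conn current).filter (fun c => !(result.contains c))))
      (measureA conn result (current :: rest), posA result (current :: rest)) := by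
  by_cases h : result.contains current = true
  · simp only [h, if_true]
    -- subset
    have hsub : ((rest ++ (adjOf conn current).filter (fun c => !(result.contains c))).toFinset ∪ adjU conn) \ result.keys.toFinset ⊆
        ((current :: rest).toFinset ∪ adjU conn) \ result.keys.toFinset := by
      intro y hy
      simp only [Finset.mem_sdiff, Finset.mem_union, List.mem_toFinset, List.mem_append,
        List.mem_filter, List.mem_cons] at hy ⊢
      rcases hy with ⟨hy1, hy2⟩
      refine ⟨?_, hy2⟩
      rcases hy1 with (hy | ⟨ha, _⟩) | hu
      · exact Or.inl (Or.inr hy)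
      · exact Or.inr (mem_adjOf ha)
      · exact Or.inr hu
    have hcard := Finset.card_le_card hsub
    rcases lt_or_eq_of_le hcard with hlt | heq
    · exact Prod.Lex.left _ _ hlt
    · rw [measureA, measureA, heq]
      apply Prod.Lex.right
      -- positions
      have hfilt0 : ((adjOf conn current).filter (fun c => !(result.contains c))).findIdx
          (fun c => !(result.contains c)) = 0 := by
        rcases hf : (adjOf conn current).filter (fun c => !(result.contains c)) with _ | ⟨y, t⟩
        · simp [List.findIdx_nil]
        · have hy : (fun c => !(result.contains c)) y = true := by
            have : y ∈ (adjOf conn current).filter (fun c => !(result.contains c)) := by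
              rw [hf]; exact List.mem_cons_self
            exact (List.mem_filter.1 this).2
          simp [List.findIdx_cons, hy]
      simp only [posA, List.findIdx_append, List.findIdx_cons, h, Bool.not_true, cond_false,
        hfilt0]
      split
      · omega
      · next hnl =>
        have := List.findIdx_le_length (p := fun c => !(result.contains c)) (xs := rest)
        omega
  · have h' : result.contains current = false := by simpa using h
    simp only [h', Bool.false_eq_true, if_false]
    apply Prod.Lex.left
    have hK : (result.insert current 1).keys.toFinset = insert current result.keys.toFinset := by
      rw [PySem.Dict.keys_insert_of_not_contains _ _ h']
      ext z; simp
    simp only [measureA, hK]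
    apply Finset.card_lt_card
    constructor
    · intro y hy
      simp only [Finset.mem_sdiff, Finset.mem_union, List.mem_toFinset, List.mem_append,
        List.mem_filter, List.mem_cons, Finset.mem_insert, not_or] at hy ⊢
      rcases hy with ⟨hy1, _, hy3⟩
      refine ⟨?_, hy3⟩
      rcases hy1 with (hy | ⟨ha, _⟩) | hu
      · exact Or.inl (Or.inr hy)
      · exact Or.inr (mem_adjOf ha)
      · exact Or.inr hu
    · intro hcon
      have hcur : current ∈ ((current :: rest).toFinset ∪ adjU conn) \ result.keys.toFinset := by
        simp only [Finset.mem_sdiff, Finset.mem_union, List.mem_toFinset, List.mem_cons]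
        refine ⟨Or.inl (by simp), fun hc => ?_⟩
        rw [(PySem.Dict.contains_iff_mem_keys result current).2 hc] at h'
        simp at h'
      have := hcon hcur
      simp at this


def bfsALoop (conn : List (String × List String)) (result : PySem.Dict String Int)
    (q : List String) : PySem.Dict String Int :=
  match q with
  | [] => result
  | current :: rest =>
    bfsALoop conn
      (if result.contains current then result else result.insert current 1)
      (rest ++ (adjOf conn current).filter (fun c => !(result.contains c)))
termination_by (measureA conn result q, posA result q)
decreasing_by exact termA conn result current rest

def bfs_traversal_py (connection : List (String × List String)) (code : String)
    (include_itself : Bool) : List String :=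
  let result := bfsALoop connection PySem.Dict.empty [code]
  let result := if include_itself then result else result.erase code
  result.keys

-- ===== PORT B =====
-- the inner `for node in frontier` loop of B: threads (visited, order, next_frontier)
def bfsBInner (conn : List (String × List String)) (visited : PySem.Set String)
    (order : List String) (nxt : List String) (frontier : List String) :
    PySem.Set String × List String × List String :=
  match frontier with
  | [] => (visited, order, nxt)
  | node :: fr =>
    if PySem.Set.contains visited node then
      bfsBInner conn visited order nxt fr
    else
      bfsBInner conn (PySem.Set.add visited node) (order ++ [node])
        (nxt ++ adjOf conn node) fr

lemma bfsBInner_visited_mono (conn : List (String × List String))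
    (frontier : List String) (visited : PySem.Set String) (order nxt : List String)
    {y : String} (h : y ∈ visited) :
    y ∈ (bfsBInner conn visited order nxt frontier).1 := by
  induction frontier generalizing visited order nxt with
  | nil => simpa [bfsBInner]
  | cons x fr ih =>
    simp only [bfsBInner]
    split
    · exact ih _ _ _ h
    · exact ih _ _ _ (by simp [PySem.Set.mem_add, h])

lemma bfsBInner_frontier_visited (conn : List (String × List String))
    (frontier : List String) (visited : PySem.Set String) (order nxt : List String)
    {x : String} (h : x ∈ frontier) :
    x ∈ (bfsBInner conn visited order nxt frontier).1 := by
  induction frontier generalizing visited order nxt with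
  | nil => simp at h
  | cons z fr ih =>
    simp only [bfsBInner]
    rcases List.mem_cons.1 h with rfl | hx
    · split
      · next hz =>
        exact bfsBInner_visited_mono _ _ _ _ _ (by simpa [PySem.Set.contains_iff] using hz)
      · exact bfsBInner_visited_mono _ _ _ _ _ (by simp [PySem.Set.mem_add])
    · split <;> exact ih _ _ _ hx
lemma bfsBInner_nxt_sub (conn : List (String × List String))
    (frontier : List String) (visited : PySem.Set String) (order nxt : List String)
    {y : String} (h : y ∈ (bfsBInner conn visited order nxt frontier).2.2) :
    y ∈ nxt ∨ y ∈ adjU conn := by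
  induction frontier generalizing visited order nxt with
  | nil => simp only [bfsBInner] at h; exact Or.inl h
  | cons x fr ih =>
    simp only [bfsBInner] at h
    split at h
    · exact ih _ _ _ h
    · rcases ih _ _ _ h with hy | hy
      · rcases List.mem_append.1 hy with hy | hy
        · exact Or.inl hy
        · exact Or.inr (mem_adjOf hy)
      · exact Or.inr hy

lemma bfsBInner_all_visited (conn : List (String × List String))
    (frontier : List String) (visited : PySem.Set String) (order nxt : List String)
    (h : ∀ x ∈ frontier, x ∈ visited) :
    bfsBInner conn visited order nxt frontier = (visited, order, nxt) := by
  induction frontier with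
  | nil => simp [bfsBInner]
  | cons x fr ih =>
    simp only [bfsBInner]
    rw [if_pos ((PySem.Set.contains_iff _ _).2 (h x List.mem_cons_self))]
    exact ih (fun z hz => h z (List.mem_cons_of_mem _ hz))


lemma termB (conn : List (String × List String)) (visited : PySem.Set String)
    (order : List String) (node : String) (fr : List String) :
    Prod.Lex (· < ·) (· < ·)
      (((((bfsBInner conn visited order [] (node :: fr)).2.2).toFinset ∪ adjU conn) \
          ((bfsBInner conn visited order [] (node :: fr)).1).toFinset).card,
        ((bfsBInner conn visited order [] (node :: fr)).2.2).length)
      ((((node :: fr).toFinset ∪ adjU conn) \ visited.toFinset).card,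
        (node :: fr).length) := by
  by_cases hall : ∀ x ∈ node :: fr, x ∈ visited
  · rw [bfsBInner_all_visited conn _ visited order [] hall]
    have hsub : ((([] : List String).toFinset ∪ adjU conn) \ visited.toFinset) ⊆
        (((node :: fr).toFinset ∪ adjU conn) \ visited.toFinset) := by
      intro y hy
      simp only [Finset.mem_sdiff, Finset.mem_union, List.mem_toFinset] at hy ⊢
      tauto
    rcases lt_or_eq_of_le (Finset.card_le_card hsub) with hlt | heq
    · exact Prod.Lex.left _ _ hlt
    · rw [heq]; exact Prod.Lex.right _ (by simp)
  · rw [not_forall] at hall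
    obtain ⟨x, hx⟩ := hall
    rw [Classical.not_imp] at hx
    obtain ⟨hxf, hxv⟩ := hx
    apply Prod.Lex.left
    apply Finset.card_lt_card
    constructor
    · intro y hy
      simp only [Finset.mem_sdiff, Finset.mem_union, List.mem_toFinset] at hy ⊢
      rcases hy with ⟨hy1, hy2⟩
      constructor
      · rcases hy1 with hy | hy
        · rcases bfsBInner_nxt_sub conn _ visited order [] hy with h0 | h0
          · simp at h0
          · exact Or.inr h0
        · exact Or.inr hy
      · exact fun hv => hy2 (bfsBInner_visited_mono conn _ visited order [] hv)
    · intro hcon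
      have hx : x ∈ (((node :: fr).toFinset ∪ adjU conn) \ visited.toFinset) := by
        simp only [Finset.mem_sdiff, Finset.mem_union, List.mem_toFinset]
        exact ⟨Or.inl hxf, hxv⟩
      have := hcon hx
      simp only [Finset.mem_sdiff, List.mem_toFinset] at this
      exact this.2 (bfsBInner_frontier_visited conn _ visited order [] hxf)

def bfsBOuter (conn : List (String × List String)) (visited : PySem.Set String)
    (order : List String) (frontier : List String) : List String :=
  match frontier with
  | [] => order
  | node :: fr =>
    let r := bfsBInner conn visited order [] (node :: fr)
    bfsBOuter conn r.1 r.2.1 r.2.2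
termination_by ((((frontier.toFinset ∪ adjU conn) \ visited.toFinset).card), frontier.length)
decreasing_by exact termB conn visited order node fr

def bfs_traversal_py_alt (connection : List (String × List String)) (code : String)
    (include_itself : Bool) : List String :=
  let order := bfsBOuter connection PySem.Set.empty [] [code]
  if include_itself then order else PySem.List.slice order (some 1) none

-- ===== PRECONDITION & SPEC =====
def Spec_bfs_traversal_py (connection : List (String × List String)) (code : String) (include_itself : Bool) (out : List String) : Prop := out = bfs_traversal_py_alt connection code include_itself
instance (connection : List (String × List String)) (code : String) (include_itself : Bool) (out : List String) : Decidable (Spec_bfs_traversal_py connection code include_itself out) := by unfold Spec_bfs_traversal_py; infer_instance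

-- ===== CLAIM (what is proved, stated in full; the proofs are below) =====
def Claim_equal_bfs_traversal_py : Prop := ∀ (connection : List (String × List String)) (code : String) (include_itself : Bool), Dom_bfs_traversal_py connection code include_itself → Spec_bfs_traversal_py connection code include_itself (bfs_traversal_py connection code include_itself)

-- ===== LEMMAS AND PROOFS =====


-- canonical single-stream BFS with a Finset visited set (proof-side only)
def canon (conn : List (String × List String)) (vis : Finset String) (q : List String) :
    List String :=
  match q with
  | [] => []
  | x :: rest =>
    if x ∈ vis then canon conn vis rest
    else x :: canon conn (insert x vis) (rest ++ adjOf conn x)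
termination_by (((q.toFinset ∪ adjU conn) \ vis).card, q.length)
decreasing_by
  · apply Prod.Lex.right'
    · apply Finset.card_le_card
      intro y hy
      simp only [Finset.mem_sdiff, Finset.mem_union, List.mem_toFinset, List.mem_cons] at hy ⊢
      tauto
    · simp
  · apply Prod.Lex.left
    apply Finset.card_lt_card
    constructor
    · intro y hy
      simp only [Finset.mem_sdiff, Finset.mem_union, List.mem_toFinset, List.mem_append,
        List.mem_cons, Finset.mem_insert, not_or] at hy ⊢
      rcases hy with ⟨hy1, _, hy3⟩
      refine ⟨?_, hy3⟩
      rcases hy1 with (hy | ha) | hu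
      · exact Or.inl (Or.inr hy)
      · exact Or.inr (mem_adjOf ha)
      · exact Or.inr hu
    · intro hcon
      rename_i hx
      have : x ∈ ((x :: rest).toFinset ∪ adjU conn) \ vis := by
        simp only [Finset.mem_sdiff, Finset.mem_union, List.mem_toFinset, List.mem_cons]
        exact ⟨Or.inl (by simp), hx⟩
      have := hcon this
      simp at this


-- s ⇝ t by deleting some elements that lie in vis0
inductive Del (vis0 : Finset String) : List String → List String → Prop
  | nil : Del vis0 [] []
  | keep (x : String) {s t : List String} : Del vis0 s t → Del vis0 (x :: s) (x :: t)
  | drop {x : String} {s t : List String} : x ∈ vis0 → Del vis0 s t → Del vis0 (x :: s) t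

lemma Del_refl (vis0 : Finset String) (s : List String) : Del vis0 s s := by
  induction s with
  | nil => exact Del.nil
  | cons x t ih => exact Del.keep x ih

lemma Del_append_right {vis0 : Finset String} {s t : List String} (u : List String)
    (h : Del vis0 s t) : Del vis0 (s ++ u) (t ++ u) := by
  induction h with
  | nil => exact Del_refl vis0 u
  | keep x h ih => exact Del.keep x ih
  | drop hx h ih => exact Del.drop hx ih

lemma Del_keep_prefix {vis0 : Finset String} {s t : List String} (u : List String)
    (h : Del vis0 s t) : Del vis0 (u ++ s) (u ++ t) := by
  induction u with
  | nil => exact h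
  | cons x u ih => exact Del.keep x ih

lemma Del_drop_all {vis0 : Finset String} {e : List String} (t : List String)
    (h : ∀ y ∈ e, y ∈ vis0) : Del vis0 (e ++ t) t := by
  induction e with
  | nil => exact Del_refl vis0 t
  | cons x e ih =>
    exact Del.drop (h x List.mem_cons_self)
      (ih (fun z hz => h z (List.mem_cons_of_mem _ hz)))

lemma Del_filter {vis0 : Finset String} (p : String → Bool) (l : List String)
    (h : ∀ y ∈ l, p y = false → y ∈ vis0) : Del vis0 l (l.filter p) := by
  induction l with
  | nil => exact Del.nil
  | cons x l ih =>
    rcases hp : p x with _ | _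
    · simp only [List.filter_cons, hp, Bool.false_eq_true, if_false]
      exact Del.drop (h x List.mem_cons_self hp)
        (ih fun z hz hzp => h z (List.mem_cons_of_mem _ hz) hzp)
    · simp only [List.filter_cons, hp, if_true]
      exact Del.keep x (ih fun z hz hzp => h z (List.mem_cons_of_mem _ hz) hzp)

-- deleting already-visited entries does not change the canonical BFS output
lemma canon_del (conn : List (String × List String)) (vis : Finset String)
    (s : List String) :
    ∀ (vis0 : Finset String) (t : List String), vis0 ⊆ vis → Del vis0 s t →
      canon conn vis s = canon conn vis t := by
  induction vis, s using canon.induct conn with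
  | case1 vis =>
    intro vis0 t hsub hdel
    cases hdel
    rfl
  | case2 vis x rest hx ih =>
    intro vis0 t hsub hdel
    cases hdel with
    | keep _ h =>
      rename_i t'
      rw [canon, if_pos hx, canon, if_pos hx]
      exact ih vis0 t' hsub h
    | drop hx0 h =>
      rw [canon, if_pos hx]
      exact ih vis0 t hsub h
  | case3 vis x rest hx ih =>
    intro vis0 t hsub hdel
    cases hdel with
    | keep _ h =>
      rename_i t'
      rw [canon, if_neg hx, canon, if_neg hx]
      exact congrArg (x :: ·)
        (ih vis0 (t' ++ adjOf conn x) (hsub.trans (Finset.subset_insert x vis))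
          (Del_append_right _ h))
    | drop hx0 h => exact absurd (hsub hx0) hx

-- duplicate entries that already occur earlier in the stream (or are visited) are harmless
lemma canon_dup (conn : List (String × List String)) (vis : Finset String)
    (s : List String) :
    ∀ (q1 extra q2 : List String), s = q1 ++ q2 → (∀ y ∈ extra, y ∈ q1 ∨ y ∈ vis) →
      canon conn vis (q1 ++ (extra ++ q2)) = canon conn vis (q1 ++ q2) := by
  induction vis, s using canon.induct conn with
  | case1 vis =>
    intro q1 extra q2 hs hyp
    have h1 : q1 = [] := (List.append_eq_nil_iff.1 hs.symm).1
    have h2 : q2 = [] := (List.append_eq_nil_iff.1 hs.symm).2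
    subst h1; subst h2
    simp only [List.nil_append, List.append_nil]
    have := canon_del conn vis (extra ++ []) vis [] (Finset.Subset.refl vis)
      (Del_drop_all [] (by simpa using fun y hy => (hyp y hy).resolve_left (by simp)))
    simpa using this
  | case2 vis x rest hx ih =>
    intro q1 extra q2 hs hyp
    cases q1 with
    | nil =>
      simp only [List.nil_append] at hs ⊢
      subst hs
      exact canon_del conn vis (extra ++ (x :: rest)) vis (x :: rest)
        (Finset.Subset.refl vis)
        (Del_drop_all _ (fun y hy => ((hyp y hy).resolve_left (by simp))))
    | cons z q1' =>
      have hz : x = z := by simpa using congrArg (fun l => l.headD "") hs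
      subst hz
      have hrest : rest = q1' ++ q2 := by simpa using hs
      simp only [List.cons_append]
      rw [canon, if_pos hx, canon, if_pos hx]
      exact ih q1' extra q2 hrest (fun y hy => by
        rcases hyp y hy with h | h
        · rcases List.mem_cons.1 h with rfl | h
          · exact Or.inr hx
          · exact Or.inl h
        · exact Or.inr h)
  | case3 vis x rest hx ih =>
    intro q1 extra q2 hs hyp
    cases q1 with
    | nil =>
      simp only [List.nil_append] at hs ⊢
      subst hs
      exact canon_del conn vis (extra ++ (x :: rest)) vis (x :: rest)
        (Finset.Subset.refl vis)
        (Del_drop_all _ (fun y hy => ((hyp y hy).resolve_left (by simp))))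
    | cons z q1' =>
      have hz : x = z := by simpa using congrArg (fun l => l.headD "") hs
      subst hz
      have hrest : rest = q1' ++ q2 := by simpa using hs
      simp only [List.cons_append]
      rw [canon, if_neg hx, canon, if_neg hx]
      refine congrArg (x :: ·) ?_
      have h1 : (q1' ++ (extra ++ q2)) ++ adjOf conn x = q1' ++ (extra ++ (q2 ++ adjOf conn x)) := by
        simp [List.append_assoc]
      have h2 : (q1' ++ q2) ++ adjOf conn x = q1' ++ (q2 ++ adjOf conn x) := by
        simp [List.append_assoc]
      rw [h1, h2]
      exact ih q1' extra (q2 ++ adjOf conn x) (by rw [hrest, List.append_assoc])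
        (fun y hy => by
          rcases hyp y hy with h | h
          · rcases List.mem_cons.1 h with rfl | h
            · exact Or.inr (Finset.mem_insert_self _ _)
            · exact Or.inl h
          · exact Or.inr (Finset.mem_insert_of_mem h))


-- A's queue invariant: neighbours of visited codes are visited or still queued
def InvA (conn : List (String × List String)) (result : PySem.Dict String Int)
    (q : List String) : Prop :=
  ∀ x ∈ result.keys, ∀ y ∈ adjOf conn x, result.contains y = true ∨ y ∈ q

lemma A_canon (conn : List (String × List String)) :
    ∀ (result : PySem.Dict String Int) (q : List String), InvA conn result q →
      (bfsALoop conn result q).keys =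
        result.keys ++ canon conn result.keys.toFinset q := by
  intro result q
  induction result, q using bfsALoop.induct conn with
  | case1 result => intro _; simp [bfsALoop, canon]
  | case2 result current rest ih =>
    intro hInv
    rw [bfsALoop]
    by_cases h : result.contains current = true
    · rw [dif_pos h] at ih
      rw [if_pos h]
      have hmemK : current ∈ result.keys := (PySem.Dict.contains_iff_mem_keys _ _).1 h
      have hyp : ∀ y ∈ (adjOf conn current).filter (fun c => !(result.contains c)),
          y ∈ rest ∨ y ∈ result.keys.toFinset := by
        intro y hy
        rcases List.mem_filter.1 hy with ⟨hya, hyc⟩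
        have hyc' : result.contains y = false := by simpa using hyc
        rcases hInv current hmemK y hya with hc | hq
        · rw [hc] at hyc'; simp at hyc'
        · rcases List.mem_cons.1 hq with rfl | hq
          · rw [h] at hyc'; simp at hyc'
          · exact Or.inl hq
      have hInv' : InvA conn result
          (rest ++ (adjOf conn current).filter (fun c => !(result.contains c))) := by
        intro x hx y hy
        rcases hInv x hx y hy with hc | hq
        · exact Or.inl hc
        · rcases List.mem_cons.1 hq with rfl | hq
          · exact Or.inl h
          · exact Or.inr (List.mem_append_left _ hq)
      rw [ih hInv']
      congr 1
      have hd := canon_dup conn result.keys.toFinset (rest ++ []) rest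
        ((adjOf conn current).filter (fun c => !(result.contains c))) [] (by simp) hyp
      rw [canon, if_pos (by simpa [List.mem_toFinset] using hmemK)]
      simpa using hd
    · have h' : result.contains current = false := by simpa using h
      rw [dif_neg h] at ih
      rw [if_neg h]
      have hkeys : (result.insert current 1).keys = result.keys ++ [current] :=
        PySem.Dict.keys_insert_of_not_contains _ _ h'
      have hcurK : current ∉ result.keys.toFinset := by
        simp only [List.mem_toFinset]
        intro hc
        rw [(PySem.Dict.contains_iff_mem_keys result current).2 hc] at h'
        simp at h'
      have hInv' : InvA conn (result.insert current 1)
          (rest ++ (adjOf conn current).filter (fun c => !(result.contains c))) := by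
        intro x hx y hy
        rw [hkeys] at hx
        have hci : ∀ z, result.contains z = true → (result.insert current 1).contains z = true := by
          intro z hz
          rw [PySem.Dict.contains_insert]
          simp [hz]
        rcases List.mem_append.1 hx with hx | hx
        · rcases hInv x hx y hy with hc | hq
          · exact Or.inl (hci y hc)
          · rcases List.mem_cons.1 hq with rfl | hq
            · exact Or.inl (PySem.Dict.contains_insert_self _ _ _)
            · exact Or.inr (List.mem_append_left _ hq)
        · have hx' : x = current := by simpa using hx
          subst hx'
          by_cases hcy : result.contains y = true
          · exact Or.inl (hci y hcy)
          · refine Or.inr (List.mem_append_right _ ?_)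
            simp only [List.mem_filter]
            exact ⟨hy, by simpa using hcy⟩
      rw [ih hInv', hkeys]
      have hK' : (result.keys ++ [current]).toFinset = insert current result.keys.toFinset := by
        ext z; simp
      rw [hK']
      have hdel : canon conn (insert current result.keys.toFinset)
          (rest ++ (adjOf conn current).filter (fun c => !(result.contains c))) =
          canon conn (insert current result.keys.toFinset) (rest ++ adjOf conn current) := by
        refine (canon_del conn _ _ result.keys.toFinset _
          (Finset.subset_insert _ _) ?_).symm
        refine Del_keep_prefix rest (Del_filter _ _ ?_)
        intro y _ hyp
        have : result.contains y = true := by simpa using hyp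
        simpa [List.mem_toFinset] using (PySem.Dict.contains_iff_mem_keys _ _).1 this
      rw [hdel, canon, if_neg hcurK]
      simp


lemma B_inner_eq (conn : List (String × List String)) (frontier : List String) :
    ∀ (visited : PySem.Set String) (order nxt : List String),
      (bfsBInner conn visited order nxt frontier).2.1 ++
        canon conn ((bfsBInner conn visited order nxt frontier).1).toFinset
          ((bfsBInner conn visited order nxt frontier).2.2) =
      order ++ canon conn visited.toFinset (frontier ++ nxt) := by
  induction frontier with
  | nil => intro visited order nxt; simp [bfsBInner]
  | cons node fr ih =>
    intro visited order nxt
    simp only [bfsBInner]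
    by_cases h : visited.contains node = true
    · rw [if_pos h]
      rw [ih visited order nxt]
      have hn : node ∈ visited.toFinset := by
        simpa [List.mem_toFinset] using (PySem.Set.contains_iff _ _).1 h
      rw [List.cons_append, canon, if_pos hn]
    · rw [if_neg h]
      rw [ih (visited.add node) (order ++ [node]) (nxt ++ adjOf conn node)]
      have hn : node ∉ visited.toFinset := by
        simp only [List.mem_toFinset]
        intro hc
        exact h ((PySem.Set.contains_iff _ _).2 hc)
      have hadd : (visited.add node).toFinset = insert node visited.toFinset := by
        rw [PySem.Set.add_of_not_mem (by simpa [List.mem_toFinset] using hn)]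
        ext z; simp
      rw [hadd, List.cons_append, canon, if_neg hn]
      simp [List.append_assoc]

lemma B_outer_eq (conn : List (String × List String)) :
    ∀ (visited : PySem.Set String) (order frontier : List String),
      bfsBOuter conn visited order frontier =
        order ++ canon conn visited.toFinset frontier := by
  intro visited order frontier
  induction visited, order, frontier using bfsBOuter.induct conn with
  | case1 visited order => simp [bfsBOuter, canon]
  | case2 visited order node fr r ih =>
    have ih' : bfsBOuter conn (bfsBInner conn visited order [] (node :: fr)).1
        (bfsBInner conn visited order [] (node :: fr)).2.1
        (bfsBInner conn visited order [] (node :: fr)).2.2 =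
        (bfsBInner conn visited order [] (node :: fr)).2.1 ++
          canon conn ((bfsBInner conn visited order [] (node :: fr)).1).toFinset
            ((bfsBInner conn visited order [] (node :: fr)).2.2) := ih
    simp only [bfsBOuter]
    rw [ih']
    have := B_inner_eq conn (node :: fr) visited order []
    simpa using this


lemma canon_not_mem (conn : List (String × List String)) (vis : Finset String)
    (q : List String) : ∀ x ∈ vis, x ∉ canon conn vis q := by
  induction vis, q using canon.induct conn with
  | case1 vis => intro x _ h; simp [canon] at h
  | case2 vis y rest hy ih =>
    intro x hx h
    rw [canon, if_pos hy] at h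
    exact ih x hx h
  | case3 vis y rest hy ih =>
    intro x hx h
    rw [canon, if_neg hy] at h
    rcases List.mem_cons.1 h with rfl | h
    · exact hy hx
    · exact ih x (Finset.mem_insert_of_mem hx) h

lemma keys_erase_eq (d : PySem.Dict String Int) (k : String) :
    (d.erase k).keys = d.keys.filter (fun x => !(x == k)) := by
  simp only [PySem.Dict.erase, PySem.Dict.keys]
  induction d.items with
  | nil => rfl
  | cons p l ih =>
    by_cases hp : (p.1 == k) = true
    · simp [hp, ih]
    · simp only [Bool.not_eq_true] at hp
      simp [hp, ih]

lemma canon_start (conn : List (String × List String)) (code : String) :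
    canon conn (∅ : Finset String) [code] =
      code :: canon conn ({code} : Finset String) (adjOf conn code) := by
  rw [canon, if_neg (Finset.notMem_empty code)]
  simp

-- ===== VERDICT (by name: the statement is the Claim_ definition above) =====
theorem bfs_traversal_py_spec : Claim_equal_bfs_traversal_py := by
  unfold Claim_equal_bfs_traversal_py
  intro conn code inc _
  unfold Spec_bfs_traversal_py bfs_traversal_py bfs_traversal_py_alt
  have hA : (bfsALoop conn PySem.Dict.empty [code]).keys =
      canon conn (∅ : Finset String) [code] := by
    have := A_canon conn PySem.Dict.empty [code]
      (by intro x hx; simp [PySem.Dict.empty, PySem.Dict.keys] at hx)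
    simpa [PySem.Dict.empty, PySem.Dict.keys] using this
  have hB : bfsBOuter conn PySem.Set.empty [] [code] =
      canon conn (∅ : Finset String) [code] := by
    simpa [PySem.Set.empty] using B_outer_eq conn PySem.Set.empty [] [code]
  cases inc with
  | true => simp only [if_true]; rw [hA, hB]
  | false =>
    simp only [Bool.false_eq_true, if_false]
    rw [keys_erase_eq, hA, hB, canon_start]
    have hsl : PySem.List.slice (code :: canon conn {code} (adjOf conn code)) (some 1) none
        = canon conn {code} (adjOf conn code) := by simp [pysem]
    rw [hsl]
    simp only [List.filter_cons, BEq.refl, Bool.not_true, Bool.false_eq_true, if_false]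
    rw [List.filter_eq_self.2 ?_]
    · intro a ha
      have : a ≠ code := by
        intro h
        subst h
        exact canon_not_mem conn {a} (adjOf conn a) a (Finset.mem_singleton_self a) ha
      simpa using this
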